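-- pv_equiv track=rewrite | github.com/thirtycents/Devkit | devkit_zero/tools/FormatDetector.py | _get_most_likely_format
-- ===== SOURCE A (Python) =====
-- def _get_most_likely_format(detections):
--     """Get most likely format"""
--     valid_formats = {
--         fmt: details['confidence']
--         for fmt, details in detections.items()
--         if details.get('is_valid', False)
--     }
--
--     if not valid_formats:
--         return 'unknown'
--
--     return max(valid_formats.items(), key=lambda x: x[1])[0]
-- ===== SOURCE B (Python) =====
-- def _get_most_likely_format(detections):
--     """Get most likely format"""
--     ranked = sorted(
--         ((fmt, details['confidence'])
--          for fmt, details in detections.items()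
--          if details.get('is_valid', False)),
--         key=lambda x: x[1], reverse=True)
--     return ranked[0][0] if ranked else 'unknown'
-- ===== Notes on version B (the rewrite author's own statement) =====
-- stated objective: alternative
-- what changed: Replaces A's build-a-dict-then-max(items) with a rank-by-sorting approach: collect the valid (format, confidence) pairs, stable-sort them by confidence descending, and return the head (stability preserves max's first-tie-winner).
import Mathlib
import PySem

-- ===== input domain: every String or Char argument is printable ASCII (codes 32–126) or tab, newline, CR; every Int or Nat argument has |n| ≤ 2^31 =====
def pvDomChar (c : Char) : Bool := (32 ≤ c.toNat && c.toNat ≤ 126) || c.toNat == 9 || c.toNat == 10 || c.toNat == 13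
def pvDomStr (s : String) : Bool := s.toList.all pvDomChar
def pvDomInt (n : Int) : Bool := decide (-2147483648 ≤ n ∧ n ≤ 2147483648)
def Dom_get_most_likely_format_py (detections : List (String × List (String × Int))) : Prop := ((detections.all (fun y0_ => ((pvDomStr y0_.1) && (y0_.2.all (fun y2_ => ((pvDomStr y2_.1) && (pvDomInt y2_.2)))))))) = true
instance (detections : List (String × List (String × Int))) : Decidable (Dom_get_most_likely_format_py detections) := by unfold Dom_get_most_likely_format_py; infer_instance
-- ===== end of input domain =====

-- ===== PORT A =====
-- B sorts the valid (format, confidence) pairs by confidence descending and takes the head,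
-- instead of A's valid-formats dict + max(items); return-value equivalence.
def get_most_likely_format_py (detections : List (String × List (String × Int))) : String :=
  let d := PySem.Dict.ofList detections
  -- dict comprehension: {fmt: details['confidence'] for fmt, details in detections.items() if details.get('is_valid', False)}
  let valid : PySem.Dict String Int :=
    d.items.foldl (fun acc p =>
      if (PySem.Dict.ofList p.2).getD "is_valid" 0 ≠ 0 then
        acc.insert p.1 (((PySem.Dict.ofList p.2).get? "confidence").getD 0)   -- Pre_ guarantees the key is present
      else acc) PySem.Dict.empty
  if valid.items = [] then "unknown"
  else ((PySem.List.max? valid.items (fun x => x.2)).map (fun x => x.1)).getD "unknown"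

-- ===== PORT B =====
def get_most_likely_format_py_alt (detections : List (String × List (String × Int))) : String :=
  let d := PySem.Dict.ofList detections
  -- ranked = sorted(((fmt, details['confidence']) for … if details.get('is_valid', False)), key=λx: x[1], reverse=True)
  let ranked : List (String × Int) :=
    PySem.List.sorted
      ((d.items.filter (fun p => decide ((PySem.Dict.ofList p.2).getD "is_valid" 0 ≠ 0))).map
        (fun p => (p.1, ((PySem.Dict.ofList p.2).get? "confidence").getD 0)))
      (fun x => x.2) true
  -- return ranked[0][0] if ranked else 'unknown'
  match ranked with
  | [] => "unknown"
  | p :: _ => p.1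

-- ===== PRECONDITION & SPEC =====
-- Pre_ excludes inputs where some entry is marked valid but has no 'confidence' key: there the Python A
-- (and B alike) raises KeyError instead of returning.
def Pre_get_most_likely_format_py (detections : List (String × List (String × Int))) : Prop :=
  ∀ p ∈ (PySem.Dict.ofList detections).items,
    (PySem.Dict.ofList p.2).getD "is_valid" 0 ≠ 0 →
    (PySem.Dict.ofList p.2).contains "confidence" = true
instance (detections : List (String × List (String × Int))) : Decidable (Pre_get_most_likely_format_py detections) := by unfold Pre_get_most_likely_format_py; infer_instance
def pvWitness_get_most_likely_format_py : (List (String × List (String × Int))) :=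
  [("json", [("is_valid", 1), ("confidence", 7)]), ("xml", [("is_valid", 0)])]
def Spec_get_most_likely_format_py (detections : List (String × List (String × Int))) (out : String) : Prop := out = get_most_likely_format_py_alt detections
instance (detections : List (String × List (String × Int))) (out : String) : Decidable (Spec_get_most_likely_format_py detections out) := by unfold Spec_get_most_likely_format_py; infer_instance

-- ===== CLAIM (what is proved, stated in full; the proofs are below) =====
def Claim_equal_get_most_likely_format_py : Prop := ∀ (detections : List (String × List (String × Int))), Dom_get_most_likely_format_py detections → Pre_get_most_likely_format_py detections → Spec_get_most_likely_format_py detections (get_most_likely_format_py detections)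

-- ===== LEMMAS AND PROOFS =====
-- the filter condition and the (fmt, confidence) pair of one detections entry
def pvCond (p : String × List (String × Int)) : Bool :=
  decide ((PySem.Dict.ofList p.2).getD "is_valid" 0 ≠ 0)
def pvPair (p : String × List (String × Int)) : String × Int :=
  (p.1, ((PySem.Dict.ofList p.2).get? "confidence").getD 0)
-- the valid (fmt, confidence) pairs, in insertion order
def pvValid (detections : List (String × List (String × Int))) : List (String × Int) :=
  ((PySem.Dict.ofList detections).items.filter pvCond).map pvPair
-- named copy of A's fold body
def pvStepA (acc : PySem.Dict String Int) (p : String × List (String × Int)) : PySem.Dict String Int :=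
  if (PySem.Dict.ofList p.2).getD "is_valid" 0 ≠ 0 then
    acc.insert p.1 (((PySem.Dict.ofList p.2).get? "confidence").getD 0)
  else acc
-- the max?-fold step
def pvMaxStep (acc : Option (String × Int)) (x : String × Int) : Option (String × Int) :=
  match acc with
  | none => some x
  | some m => if m.2 < x.2 then some x else some m

lemma stepA_eq : pvStepA = (fun acc p => if pvCond p then acc.insert (pvPair p).1 (pvPair p).2 else acc) := by
  funext acc p
  simp [pvStepA, pvCond, pvPair]

lemma items_valid (detections : List (String × List (String × Int))) :
    ((PySem.Dict.ofList detections).items.foldl pvStepA PySem.Dict.empty).items = pvValid detections := by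
  rw [stepA_eq, ← List.foldl_filter]
  have hnd : (((PySem.Dict.ofList detections).items.filter pvCond).map
      (fun p => (pvPair p).1)).Nodup := by
    have h1 : (((PySem.Dict.ofList detections).items.filter pvCond).map
        (fun p => (pvPair p).1)) = (((PySem.Dict.ofList detections).items.filter pvCond).map Prod.fst) := by
      simp [pvPair]
    rw [h1]
    have hk : ((PySem.Dict.ofList detections).items.map Prod.fst).Nodup := by
      have := PySem.Dict.nodup_keys_ofList (κ := String) (ν := List (String × Int)) detections
      simpa [PySem.Dict.keys] using this
    exact hk.sublist ((List.filter_sublist).map Prod.fst)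
  have := PySem.Dict.items_foldl_insert_fresh
    ((PySem.Dict.ofList detections).items.filter pvCond)
    (fun p => (pvPair p).1) (fun p => (pvPair p).2) PySem.Dict.empty
    (by intro a _; simp) hnd
  simpa [pvValid, pvPair] using this

-- the head of a descending insertBy step is exactly the running-max step
lemma head_insertBy (x : String × Int) (acc : List (String × Int)) :
    (PySem.List.insertBy (fun a b => decide (b.2 < a.2)) x acc).head?
      = pvMaxStep acc.head? x := by
  cases acc with
  | nil => rfl
  | cons h t =>
    by_cases hlt : h.2 < x.2
    · simp [PySem.List.insertBy, pvMaxStep, hlt]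
    · simp [PySem.List.insertBy, pvMaxStep, hlt]

lemma max?_eq_foldl_pvMaxStep (xs : List (String × Int)) :
    PySem.List.max? xs (fun x => x.2) = xs.foldl pvMaxStep none := by
  simp only [PySem.List.max?]
  apply List.foldl_ext
  intro acc b _
  cases acc <;> rfl

-- head of the descending stable sort = Python max (first extremal element)
lemma head_sorted_rev (xs : List (String × Int)) :
    (PySem.List.sorted xs (fun x => x.2) true).head? = PySem.List.max? xs (fun x => x.2) := by
  rw [PySem.List.sorted_rev_eq_foldl_insertBy, max?_eq_foldl_pvMaxStep]
  suffices h : ∀ (acc : List (String × Int)),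
      (xs.foldl (fun acc x => PySem.List.insertBy (fun a b => decide (b.2 < a.2)) x acc) acc).head?
        = xs.foldl pvMaxStep acc.head? by
    exact h []
  induction xs with
  | nil => intro acc; rfl
  | cons x t ih =>
    intro acc
    rw [List.foldl_cons, List.foldl_cons, ih, head_insertBy]

lemma portA_stepA : get_most_likely_format_py = fun detections =>
    let valid := (PySem.Dict.ofList detections).items.foldl pvStepA PySem.Dict.empty
    if valid.items = [] then "unknown"
    else ((PySem.List.max? valid.items (fun x => x.2)).map (fun x => x.1)).getD "unknown" := by
  rfl

lemma portB_valid : get_most_likely_format_py_alt = fun detections =>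
    match PySem.List.sorted (pvValid detections) (fun x => x.2) true with
    | [] => "unknown"
    | p :: _ => p.1 := by
  rfl

-- ===== VERDICT (by name: the statement is the Claim_ definition above) =====
theorem get_most_likely_format_py_spec : Claim_equal_get_most_likely_format_py := by
  intro detections _ _
  unfold Spec_get_most_likely_format_py
  rw [portA_stepA, portB_valid]
  simp only [items_valid]
  rcases hs : PySem.List.sorted (pvValid detections) (fun x => x.2) true with _ | ⟨m, t⟩
  · have hnil : pvValid detections = [] :=
      (PySem.List.sorted_eq_nil_iff _ _ _).mp hs
    simp [hnil]
  · have hne : pvValid detections ≠ [] := by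
      intro he
      rw [he] at hs
      simp [PySem.List.sorted] at hs
    have hmax : PySem.List.max? (pvValid detections) (fun x => x.2) = some m := by
      rw [← head_sorted_rev, hs]; rfl
    simp [hne, hmax]
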